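-- pv_equiv track=rewrite | github.com/caseyglarkin2-png/sales-agent | src/enrichment/contact_enricher.py | _normalize_job_title
-- ===== SOURCE A (Python) =====
-- def _normalize_job_title(title: str) -> str:
--     """Normalize job title for consistent matching."""
--     if not title:
--         return ""
--
--     title = title.lower().strip()
--
--     # Common normalizations
--     normalizations = {
--         "vp": "vice president",
--         "svp": "senior vice president",
--         "evp": "executive vice president",
--         "dir": "director",
--         "mgr": "manager",
--         "sr": "senior",
--         "jr": "junior",
--     }
--
--     for abbrev, full in normalizations.items():
--         if title.startswith(abbrev + " ") or title.startswith(abbrev + "."):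
--             title = full + title[len(abbrev):]
--
--     return title
-- ===== SOURCE B (Python) =====
-- def _expand(head):
--     """Expand a job-title abbreviation, or return None."""
--     if head == "vp":
--         return "vice president"
--     if head == "svp":
--         return "senior vice president"
--     if head == "evp":
--         return "executive vice president"
--     if head == "dir":
--         return "director"
--     if head == "mgr":
--         return "manager"
--     if head == "sr":
--         return "senior"
--     if head == "jr":
--         return "junior"
--     return None
--
--
-- def _normalize_job_title(title: str) -> str:
--     """Normalize job title for consistent matching."""
--     if not title:
--         return ""
--
--     title = title.lower().strip()
--
--     # Locate the first separator (space or period); only a leading word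
--     # followed by a separator can be an abbreviation to expand.
--     seps = [i for i in (title.find(" "), title.find(".")) if i != -1]
--     if not seps:
--         return title
--     cut = min(seps)
--
--     full = _expand(title[:cut])
--     return full + title[cut:] if full is not None else title
-- ===== Notes on version B (the rewrite author's own statement) =====
-- stated objective: idiomatic
-- what changed: Instead of A's loop testing every abbreviation with two startswith calls, B locates the first separator once via str.find for each of the two separator characters plus min, then expands the leading word with a single direct lookup (if/elif helper).
import Mathlib
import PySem

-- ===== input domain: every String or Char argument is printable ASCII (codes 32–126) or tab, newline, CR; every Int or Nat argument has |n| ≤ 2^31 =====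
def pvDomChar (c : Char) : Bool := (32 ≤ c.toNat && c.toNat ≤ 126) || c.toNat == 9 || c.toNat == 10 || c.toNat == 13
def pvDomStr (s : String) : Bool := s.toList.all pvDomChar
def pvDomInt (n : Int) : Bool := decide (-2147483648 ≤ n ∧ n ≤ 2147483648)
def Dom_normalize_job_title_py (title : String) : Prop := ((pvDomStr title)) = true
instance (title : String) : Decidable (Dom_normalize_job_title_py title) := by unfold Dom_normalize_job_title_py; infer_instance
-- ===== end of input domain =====

-- B finds the first separator once (str.find + min) and expands the leading word with one
-- direct lookup, instead of A's loop testing every abbreviation with startswith (objective: idiomatic).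

-- ===== PORT A =====
-- the in-function normalizations dict of A, as an association list in insertion order
def pvNormsA : List (List Char × List Char) :=
  [("vp".toList, "vice president".toList),
   ("svp".toList, "senior vice president".toList),
   ("evp".toList, "executive vice president".toList),
   ("dir".toList, "director".toList),
   ("mgr".toList, "manager".toList),
   ("sr".toList, "senior".toList),
   ("jr".toList, "junior".toList)]

-- one iteration of A's `for abbrev, full in normalizations.items():` body
def pvAStep (t : List Char) (kv : List Char × List Char) : List Char :=
  if PySem.Chars.startswith t (kv.1 ++ [' ']) || PySem.Chars.startswith t (kv.1 ++ ['.']) then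
    kv.2 ++ PySem.Chars.slice t (some (kv.1.length : Int)) none
  else t

def normalize_job_title_py (title : String) : String :=
  if title.toList = [] then ""
  else
    let t := PySem.Chars.strip (PySem.Chars.lower title.toList)
    String.ofList (pvNormsA.foldl pvAStep t)

-- ===== PORT B =====
-- Source B's _expand helper: an if/elif chain returning Optional[str]
def pvExpand (head : List Char) : Option (List Char) :=
  if head = "vp".toList then some "vice president".toList
  else if head = "svp".toList then some "senior vice president".toList
  else if head = "evp".toList then some "executive vice president".toList
  else if head = "dir".toList then some "director".toList
  else if head = "mgr".toList then some "manager".toList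
  else if head = "sr".toList then some "senior".toList
  else if head = "jr".toList then some "junior".toList
  else none

def normalize_job_title_py_alt (title : String) : String :=
  if title.toList = [] then ""
  else
    let t := PySem.Chars.strip (PySem.Chars.lower title.toList)
    let seps : List Int := [PySem.Chars.find t [' '], PySem.Chars.find t ['.']].filter (· ≠ -1)
    match PySem.List.min? seps id with
    | none => String.ofList t
    | some cut =>
      match pvExpand (PySem.Chars.slice t none (some cut)) with
      | some full => String.ofList (full ++ PySem.Chars.slice t (some cut) none)
      | none => String.ofList t

-- ===== PRECONDITION & SPEC =====
def Spec_normalize_job_title_py (title : String) (out : String) : Prop := out = normalize_job_title_py_alt title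
instance (title : String) (out : String) : Decidable (Spec_normalize_job_title_py title out) := by unfold Spec_normalize_job_title_py; infer_instance

-- ===== CLAIM (what is proved, stated in full; the proofs are below) =====
def Claim_equal_normalize_job_title_py : Prop := ∀ (title : String), Dom_normalize_job_title_py title → Spec_normalize_job_title_py title (normalize_job_title_py title)

-- ===== LEMMAS AND PROOFS =====

-- a character is a separator
def pvIsSep (c : Char) : Prop := c = ' ' ∨ c = '.'

def pvNonSep (c : Char) : Bool := !(c == ' ' || c == '.')

lemma pvNonSep_iff (c : Char) : pvNonSep c = true ↔ ¬ pvIsSep c := by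
  simp [pvNonSep, pvIsSep]

-- a separator-free string matches no abbreviation pattern, so A's step is the identity
lemma pvAStep_id (t : List Char) (hsep : ∀ c ∈ t, ¬ pvIsSep c) (kv : List Char × List Char) :
    pvAStep t kv = t := by
  unfold pvAStep
  rw [if_neg]
  intro h
  rcases Bool.or_eq_true_iff.mp h with h' | h' <;>
    [exact hsep ' ' ((PySem.Chars.startswith_iff _ _ |>.mp h').subset (by simp)) (Or.inl rfl);
     exact hsep '.' ((PySem.Chars.startswith_iff _ _ |>.mp h').subset (by simp)) (Or.inr rfl)]

lemma pvFoldl_fix {α β : Type} (f : α → β → α) (a : α) (l : List β)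
    (h : ∀ b ∈ l, f a b = a) : l.foldl f a = a := by
  induction l with
  | nil => rfl
  | cons b bs ih => simp only [List.foldl_cons, h b (by simp)]; exact ih (fun b hb => h b (List.mem_cons_of_mem _ hb))

-- if an abbreviation pattern k++[x] is a prefix of u++c::cs with u, k separator-free and c, x separators, then k = u
lemma pvPrefix_eq (k : List Char) : ∀ (u cs : List Char) (c x : Char),
    (∀ a ∈ u, ¬ pvIsSep a) → (∀ a ∈ k, ¬ pvIsSep a) → pvIsSep c → pvIsSep x →
    (k ++ [x]) <+: (u ++ c :: cs) → k = u := by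
  induction k with
  | nil =>
    intro u cs c x hu hk hc hx hp
    cases u with
    | nil => rfl
    | cons d u' =>
      exfalso
      rcases hp with ⟨r, hr⟩
      simp at hr
      exact hu d (by simp) (hr.1 ▸ hx)
  | cons a k' ih =>
    intro u cs c x hu hk hc hx hp
    cases u with
    | nil =>
      exfalso
      rcases hp with ⟨r, hr⟩
      simp at hr
      exact hk a (by simp) (hr.1 ▸ hc)
    | cons d u' =>
      rcases hp with ⟨r, hr⟩
      simp at hr
      have : (k' ++ [x]) <+: (u' ++ c :: cs) := ⟨r, by simpa using hr.2⟩
      have := ih u' cs c x (fun a ha => hu a (by simp [ha])) (fun b hb => hk b (by simp [hb])) hc hx this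
      simp [hr.1, this]

-- every key of A's dict is separator-free and is expanded by B's helper
set_option maxRecDepth 4096 in
lemma pvKeysProps : ∀ kv ∈ pvNormsA, (∀ a ∈ kv.1, ¬ pvIsSep a) ∧ (pvExpand kv.1).isSome := by
  intro kv hkv
  simp only [pvNormsA, List.mem_cons, List.not_mem_nil, or_false] at hkv
  rcases hkv with h | h | h | h | h | h | h <;> subst h <;> exact ⟨by simp [pvIsSep], by decide⟩

-- [a] is an infix iff a is a member
lemma pvSingleInfix (a : Char) (l : List Char) : [a] <:+: l ↔ a ∈ l := by
  constructor
  · rintro ⟨s, t, h⟩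
    subst h; simp
  · intro h
    rcases List.append_of_mem h with ⟨s, t, rfl⟩
    exact ⟨s, t, by simp⟩

-- dropping strictly inside u exposes a member of u at the head
lemma pvDropHead (u x : List Char) (i : Nat) (hi : i < u.length) :
    ∃ b l', (u ++ x).drop i = b :: l' ∧ b ∈ u := by
  rw [List.drop_append_of_le_length hi.le]
  cases hd : u.drop i with
  | nil => exfalso; have := List.length_drop (l := u) (i := i); rw [hd] at this; simp at this; omega
  | cons b l' =>
    exact ⟨b, l' ++ x, by simp, List.drop_subset i u (by rw [hd]; simp)⟩

-- the first occurrence of the separator standing right after the separator-free prefix u is at u.length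
lemma pvFindAt (u cs : List Char) (a : Char) (ha : a ∉ u) :
    PySem.Chars.find (u ++ a :: cs) [a] = (u.length : Int) := by
  have hinf : [a] <:+: (u ++ a :: cs) := (pvSingleInfix _ _).mpr (by simp)
  have h0 : 0 ≤ PySem.Chars.find (u ++ a :: cs) [a] := (PySem.Chars.find_nonneg_iff _ _).mpr hinf
  obtain ⟨hpre, hmin⟩ := PySem.Chars.find_spec h0
  set f := PySem.Chars.find (u ++ a :: cs) [a] with hf
  have hle : f.toNat ≤ u.length := by
    by_contra hgt
    exact hmin u.length (by omega) (by rw [List.drop_left]; exact ⟨cs, rfl⟩)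
  have hge : ¬ f.toNat < u.length := by
    intro hlt
    obtain ⟨b, l', hd, hb⟩ := pvDropHead u (a :: cs) f.toNat hlt
    rw [hd] at hpre
    rcases hpre with ⟨r, hr⟩
    simp at hr
    exact ha (hr.1 ▸ hb)
  have : f.toNat = u.length := by omega
  omega

-- any separator absent from u and different from the one at u.length is found at -1 or at ≥ u.length
lemma pvFindGe (u cs : List Char) (c a : Char) (ha : a ∉ u) (hne : a ≠ c) :
    PySem.Chars.find (u ++ c :: cs) [a] = -1 ∨ (u.length : Int) ≤ PySem.Chars.find (u ++ c :: cs) [a] := by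
  by_cases h : PySem.Chars.find (u ++ c :: cs) [a] = -1
  · exact Or.inl h
  · right
    have h0 : 0 ≤ PySem.Chars.find (u ++ c :: cs) [a] := by
      rcases (PySem.Chars.neg_one_le_find (s := u ++ c :: cs) (sub := [a])).lt_or_eq with h' | h'
      · omega
      · exact absurd h'.symm h
    obtain ⟨hpre, _⟩ := PySem.Chars.find_spec h0
    set f := PySem.Chars.find (u ++ c :: cs) [a] with hf
    by_contra hlt
    rw [not_le] at hlt
    have hlt' : f.toNat < u.length ∨ f.toNat = u.length := by omega
    rcases hlt' with hlt' | heq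
    · obtain ⟨b, l', hd, hb⟩ := pvDropHead u (c :: cs) f.toNat hlt'
      rw [hd] at hpre
      rcases hpre with ⟨r, hr⟩
      simp at hr
      exact ha (hr.1 ▸ hb)
    · rw [heq, List.drop_left] at hpre
      rcases hpre with ⟨r, hr⟩
      simp at hr
      exact hne hr.1

-- A's whole fold on u ++ sep :: cs is exactly B's one lookup of u
set_option maxRecDepth 4096 in
lemma pvCoreSep (u : List Char) (c : Char) (cs : List Char)
    (hu : ∀ a ∈ u, ¬ pvIsSep a) (hc : pvIsSep c) :
    pvNormsA.foldl pvAStep (u ++ c :: cs) =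
      (match pvExpand u with
       | some full => full ++ c :: cs
       | none => u ++ c :: cs) := by
  by_cases h1 : u = ['v','p']
  · subst h1
    have hE : pvExpand ['v','p'] = some "vice president".toList := by decide
    rw [hE]
    rcases hc with h | h <;> subst h <;>
      simp [pvNormsA, pvAStep, PySem.Chars.startswith, List.isPrefixOf,
        PySem.Chars.slice_eq_listSlice, PySem.List.slice_from]
  by_cases h2 : u = ['s','v','p']
  · subst h2
    have hE : pvExpand ['s','v','p'] = some "senior vice president".toList := by decide
    rw [hE]
    rcases hc with h | h <;> subst h <;>
      simp [pvNormsA, pvAStep, PySem.Chars.startswith, List.isPrefixOf,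
        PySem.Chars.slice_eq_listSlice, PySem.List.slice_from]
  by_cases h3 : u = ['e','v','p']
  · subst h3
    have hE : pvExpand ['e','v','p'] = some "executive vice president".toList := by decide
    rw [hE]
    rcases hc with h | h <;> subst h <;>
      simp [pvNormsA, pvAStep, PySem.Chars.startswith, List.isPrefixOf,
        PySem.Chars.slice_eq_listSlice, PySem.List.slice_from]
  by_cases h4 : u = ['d','i','r']
  · subst h4
    have hE : pvExpand ['d','i','r'] = some "director".toList := by decide
    rw [hE]
    rcases hc with h | h <;> subst h <;>
      simp [pvNormsA, pvAStep, PySem.Chars.startswith, List.isPrefixOf,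
        PySem.Chars.slice_eq_listSlice, PySem.List.slice_from]
  by_cases h5 : u = ['m','g','r']
  · subst h5
    have hE : pvExpand ['m','g','r'] = some "manager".toList := by decide
    rw [hE]
    rcases hc with h | h <;> subst h <;>
      simp [pvNormsA, pvAStep, PySem.Chars.startswith, List.isPrefixOf,
        PySem.Chars.slice_eq_listSlice, PySem.List.slice_from]
  by_cases h6 : u = ['s','r']
  · subst h6
    have hE : pvExpand ['s','r'] = some "senior".toList := by decide
    rw [hE]
    rcases hc with h | h <;> subst h <;>
      simp [pvNormsA, pvAStep, PySem.Chars.startswith, List.isPrefixOf,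
        PySem.Chars.slice_eq_listSlice, PySem.List.slice_from]
  by_cases h7 : u = ['j','r']
  · subst h7
    have hE : pvExpand ['j','r'] = some "junior".toList := by decide
    rw [hE]
    rcases hc with h | h <;> subst h <;>
      simp [pvNormsA, pvAStep, PySem.Chars.startswith, List.isPrefixOf,
        PySem.Chars.slice_eq_listSlice, PySem.List.slice_from]
  have hE : pvExpand u = none := by
    simp [pvExpand, h1, h2, h3, h4, h5, h6, h7]
  rw [hE]
  refine pvFoldl_fix _ _ _ ?_
  intro kv hkv
  unfold pvAStep
  rw [if_neg]
  intro hfire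
  have hkprop := pvKeysProps kv hkv
  have hkeq : kv.1 = u := by
    rcases Bool.or_eq_true_iff.mp hfire with hs | hs
    · exact pvPrefix_eq kv.1 u cs c ' ' hu hkprop.1 hc (Or.inl rfl)
        ((PySem.Chars.startswith_iff _ _).mp hs)
    · exact pvPrefix_eq kv.1 u cs c '.' hu hkprop.1 hc (Or.inr rfl)
        ((PySem.Chars.startswith_iff _ _).mp hs)
  have := hkprop.2
  rw [hkeq, hE] at this
  simp at this

lemma pvDropWhileHead {p : Char → Bool} {x : Char} {xs : List Char} :
    ∀ {l : List Char}, List.dropWhile p l = x :: xs → p x = false := by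
  intro l
  induction l with
  | nil => intro h; simp [List.dropWhile] at h
  | cons a l ih =>
    intro h
    rw [List.dropWhile_cons] at h
    by_cases hp : p a
    · exact ih (by simpa [hp] using h)
    · simp only [hp] at h
      cases h
      simpa using hp

lemma pvFilterBoth (a b : Int) (ha : a ≠ -1) (hb : b ≠ -1) :
    List.filter (fun x => decide (x ≠ -1)) [a, b] = [a, b] := by simp [ha, hb]

lemma pvFilterFst (a b : Int) (ha : a ≠ -1) (hb : b = -1) :
    List.filter (fun x => decide (x ≠ -1)) [a, b] = [a] := by simp [ha, hb]

lemma pvFilterSnd (a b : Int) (ha : a = -1) (hb : b ≠ -1) :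
    List.filter (fun x => decide (x ≠ -1)) [a, b] = [b] := by simp [ha, hb]

lemma pvMin1 (a : Int) : PySem.List.min? [a] id = some a := by
  simp [PySem.List.min?]

lemma pvMin2 (p q : Int) (hpq : p ≤ q) : PySem.List.min? [p, q] id = some p := by
  simp only [PySem.List.min?, List.foldl, id]
  split_ifs with h'
  · exfalso; omega
  · rfl

lemma pvMin2' (p q : Int) (hqp : q ≤ p) : PySem.List.min? [p, q] id = some q := by
  simp only [PySem.List.min?, List.foldl, id]
  split_ifs with h'
  · rfl
  · have : p = q := by omega
    rw [this]

-- ===== VERDICT (by name: the statement is the Claim_ definition above) =====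
theorem normalize_job_title_py_spec : Claim_equal_normalize_job_title_py := by
  intro title _
  unfold Spec_normalize_job_title_py normalize_job_title_py normalize_job_title_py_alt
  by_cases h : title.toList = []
  · simp [h]
  · simp only [h, if_false]
    set t := PySem.Chars.strip (PySem.Chars.lower title.toList) with ht
    have hsplit : t.takeWhile pvNonSep ++ t.dropWhile pvNonSep = t := List.takeWhile_append_dropWhile
    set u := t.takeWhile pvNonSep with hu
    have huns : ∀ a ∈ u, ¬ pvIsSep a := by
      intro a ha
      exact (pvNonSep_iff a).mp (List.mem_takeWhile_imp ha)
    have hsp : ' ' ∉ u := fun hm => huns _ hm (Or.inl rfl)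
    have hdot : '.' ∉ u := fun hm => huns _ hm (Or.inr rfl)
    cases hrest : t.dropWhile pvNonSep with
    | nil =>
      have htu : t = u := by rw [← hsplit, hrest, List.append_nil]
      have hf1 : PySem.Chars.find t [' '] = -1 :=
        (PySem.Chars.find_eq_neg_one_iff _ _).mpr
          (fun hinf => hsp (htu ▸ (pvSingleInfix _ _).mp hinf))
      have hf2 : PySem.Chars.find t ['.'] = -1 :=
        (PySem.Chars.find_eq_neg_one_iff _ _).mpr
          (fun hinf => hdot (htu ▸ (pvSingleInfix _ _).mp hinf))
      rw [hf1, hf2]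
      have hfold : pvNormsA.foldl pvAStep t = t :=
        pvFoldl_fix _ _ _ (fun kv _ => pvAStep_id t (fun a ha => huns a (htu ▸ ha)) kv)
      simp [List.filter, PySem.List.min?, hfold]
    | cons c cs =>
      have hcns : pvNonSep c = false := pvDropWhileHead hrest
      have hc : pvIsSep c := by
        by_contra hnc
        rw [← (pvNonSep_iff c)] at hnc
        simp [hcns] at hnc
      have htu : t = u ++ c :: cs := by rw [← hsplit, hrest]
      have hsl1 : PySem.Chars.slice t none (some (u.length : Int)) = u := by
        rw [htu, PySem.Chars.slice_eq_listSlice, PySem.List.slice_to_natCast, List.take_left]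
      have hsl2 : PySem.Chars.slice t (some (u.length : Int)) none = c :: cs := by
        rw [htu, PySem.Chars.slice_eq_listSlice,
          PySem.List.slice_from _ (by positivity)]
        simp
      have hL : ((u.length : Int)) ≠ -1 := by omega
      have hmin : PySem.List.min?
          (([PySem.Chars.find t [' '], PySem.Chars.find t ['.']] : List Int).filter (· ≠ -1)) id
          = some (u.length : Int) := by
        rcases hc with hcc | hcc
        · have hf1 : PySem.Chars.find t [' '] = (u.length : Int) := by
            rw [htu, hcc]; exact pvFindAt u cs ' ' hsp
          rcases (htu ▸ pvFindGe u cs c '.' hdot (by rw [hcc]; decide)) with hf2 | hf2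
          · rw [hf1, hf2, pvFilterFst _ _ hL rfl, pvMin1]
          · rw [hf1, pvFilterBoth _ _ hL (by omega), pvMin2 _ _ hf2]
        · have hf2 : PySem.Chars.find t ['.'] = (u.length : Int) := by
            rw [htu, hcc]; exact pvFindAt u cs '.' hdot
          rcases (htu ▸ pvFindGe u cs c ' ' hsp (by rw [hcc]; decide)) with hf1 | hf1
          · rw [hf2, pvFilterSnd _ _ hf1 hL, pvMin1]
          · rw [hf2, pvFilterBoth _ _ (by omega) hL, pvMin2' _ _ hf1]
      rw [hmin]
      have hfold := pvCoreSep u c cs huns hc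
      rw [← htu] at hfold
      simp only [hsl1, hsl2, hfold]
      cases hE : pvExpand u <;> simp
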